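-- pv_equiv track=rewrite | github.com/klestoff/AoC | 2023/13.py | get_candidate_error_count
-- ===== SOURCE A (Python) =====
-- def get_candidate_error_count(checked_value: str | list[str], candidate: int, max_errors_count: int) -> int:
--     errors = 0
--
--     step = 1
--     while candidate - step + 1 >= 0 and candidate + step < len(checked_value) and errors <= max_errors_count:
--         if checked_value[candidate - step + 1] != checked_value[candidate + step]:
--             for a, b in zip(checked_value[candidate - step + 1], checked_value[candidate + step]):
--                 errors += 1 if a != b else 0
--         step += 1
--
--     return errors
-- ===== SOURCE B (Python) =====
-- def get_candidate_error_count(checked_value, candidate, max_errors_count):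
--     n = len(checked_value)
--     pairs = min(candidate + 1, n - candidate - 1)
--     dists = [
--         sum(a != b for a, b in zip(checked_value[candidate - t], checked_value[candidate + 1 + t]))
--         for t in range(max(pairs, 0))
--     ]
--     totals = [0]
--     for d in dists:
--         totals.append(totals[-1] + d)
--     for p in totals:
--         if p > max_errors_count:
--             return p
--     return totals[-1]
-- ===== Notes on version B (the rewrite author's own statement) =====
-- stated objective: alternative
-- what changed: B replaces A's interleaved while-loop with early exit by three staged passes: a closed-form pair count, an eagerly built table of per-pair Hamming distances, a prefix-sum table of running totals seeded with 0, and finally a linear search returning the first running total that breaches the cap (else the final total); no early exit or mutable loop guard remains.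
import Mathlib
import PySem

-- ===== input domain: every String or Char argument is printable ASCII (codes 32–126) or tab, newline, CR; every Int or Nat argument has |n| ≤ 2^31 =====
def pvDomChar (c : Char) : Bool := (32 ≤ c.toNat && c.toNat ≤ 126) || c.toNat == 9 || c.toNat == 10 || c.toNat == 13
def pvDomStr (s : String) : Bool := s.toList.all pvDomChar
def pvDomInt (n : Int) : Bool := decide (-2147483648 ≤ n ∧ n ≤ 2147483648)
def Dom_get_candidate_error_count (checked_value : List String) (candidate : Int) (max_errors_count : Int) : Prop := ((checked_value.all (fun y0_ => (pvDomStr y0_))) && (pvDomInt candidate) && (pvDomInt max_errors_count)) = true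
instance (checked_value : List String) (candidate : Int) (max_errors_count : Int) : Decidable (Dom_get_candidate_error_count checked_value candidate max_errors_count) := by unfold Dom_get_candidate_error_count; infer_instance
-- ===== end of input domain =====

-- B computes the answer in stages (closed-form pair count, full distance table, prefix-sum table,
-- then a search for the first total over the cap) instead of A's early-exit while loop (objective: alternative).

set_option maxRecDepth 8000


-- ===== PORT A =====
-- inner 'for a, b in zip(l, r): errors += 1 if a != b else 0' (folds starting from errors)
def pvHamA (l r : String) (errors : Int) : Int :=
  (l.toList.zip r.toList).foldl (fun e p => e + (if p.1 ≠ p.2 then 1 else 0)) errors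

-- the while loop of A, state (errors, step); indices are in range whenever the guard holds
def pvLoopA (checked_value : List String) (candidate max_errors_count : Int)
    (errors step : Int) : Int :=
  if h : candidate - step + 1 ≥ 0 ∧ candidate + step < checked_value.length ∧ errors ≤ max_errors_count then
    let l := (PySem.List.pyGet? checked_value (candidate - step + 1)).getD ""
    let r := (PySem.List.pyGet? checked_value (candidate + step)).getD ""
    let errors' := if l ≠ r then pvHamA l r errors else errors
    pvLoopA checked_value candidate max_errors_count errors' (step + 1)
  else errors
termination_by ((checked_value.length : Int) - (candidate + step)).toNat
decreasing_by omega

def get_candidate_error_count (checked_value : List String) (candidate : Int) (max_errors_count : Int) : Int :=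
  pvLoopA checked_value candidate max_errors_count 0 1

-- ===== PORT B =====
-- sum(a != b for a, b in zip(l, r))
def pvHamB (l r : String) : Int :=
  (l.toList.zip r.toList).foldl (fun e p => e + (if p.1 ≠ p.2 then 1 else 0)) 0

def get_candidate_error_count_alt (checked_value : List String) (candidate : Int) (max_errors_count : Int) : Int :=
  let n : Int := checked_value.length
  let pairs : Int := min (candidate + 1) (n - candidate - 1)
  -- dists = [sum(a != b for a, b in zip(cv[candidate - t], cv[candidate + 1 + t])) for t in range(max(pairs, 0))]
  let dists : List Int := (List.range (max pairs 0).toNat).map (fun t =>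
      pvHamB ((PySem.List.pyGet? checked_value (candidate - Int.ofNat t)).getD "")
             ((PySem.List.pyGet? checked_value (candidate + 1 + Int.ofNat t)).getD ""))
  -- totals = [0]; for d in dists: totals.append(totals[-1] + d)
  let totals : List Int := dists.foldl (fun acc d => acc ++ [acc.getLastD 0 + d]) [0]
  -- for p in totals: if p > max_errors_count: return p \n return totals[-1]  (totals is never empty)
  match totals.find? (fun p => decide (p > max_errors_count)) with
  | some p => p
  | none => totals.getLastD 0

-- ===== PRECONDITION & SPEC =====
def Spec_get_candidate_error_count (checked_value : List String) (candidate : Int) (max_errors_count : Int) (out : Int) : Prop := out = get_candidate_error_count_alt checked_value candidate max_errors_count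
instance (checked_value : List String) (candidate : Int) (max_errors_count : Int) (out : Int) : Decidable (Spec_get_candidate_error_count checked_value candidate max_errors_count out) := by unfold Spec_get_candidate_error_count; infer_instance

-- ===== CLAIM (what is proved, stated in full; the proofs are below) =====
def Claim_equal_get_candidate_error_count : Prop := ∀ (checked_value : List String) (candidate : Int) (max_errors_count : Int), Dom_get_candidate_error_count checked_value candidate max_errors_count → Spec_get_candidate_error_count checked_value candidate max_errors_count (get_candidate_error_count checked_value candidate max_errors_count)

-- ===== LEMMAS AND PROOFS =====

-- reference recursion: consume the distance list with A's stop rule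
def pvLoopR (m : Int) : List Int → Int → Int
  | [], e => e
  | d :: ds, e => if e > m then e else pvLoopR m ds (e + d)

-- running totals of ds starting from e, including e itself
def pvScan (e : Int) : List Int → List Int
  | [] => [e]
  | d :: ds => e :: pvScan (e + d) ds

-- B's final search, as a function of the totals table
def pvPick (m : Int) (l : List Int) : Int :=
  match l.find? (fun p => decide (p > m)) with
  | some p => p
  | none => l.getLastD 0

theorem pvHamA_eq (l r : String) (e : Int) : pvHamA l r e = e + pvHamB l r := by
  simp [pvHamA, pvHamB, PySem.List.foldl_add]

theorem pvHamB_self (l : String) : pvHamB l l = 0 := by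
  unfold pvHamB
  induction l.toList with
  | nil => rfl
  | cons a t ih => simpa using ih

theorem pvScan_ne_nil (e : Int) (ds : List Int) : pvScan e ds ≠ [] := by
  cases ds <;> simp [pvScan]

-- B's totals table is pvScan 0 dists
theorem pvFoldScan (ds : List Int) : ∀ (pre : List Int) (e : Int),
    ds.foldl (fun acc d => acc ++ [acc.getLastD 0 + d]) (pre ++ [e]) = pre ++ pvScan e ds := by
  induction ds with
  | nil => intro pre e; simp [pvScan]
  | cons d ds ih =>
    intro pre e
    have hlast : (pre ++ [e]).getLastD 0 = e := by simp
    simp only [List.foldl_cons, hlast]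
    have := ih (pre ++ [e]) (e + d)
    rw [List.append_assoc] at this
    simpa [pvScan] using this

theorem pvPick_cons (m e : Int) (l : List Int) (hl : l ≠ []) :
    pvPick m (e :: l) = if e > m then e else pvPick m l := by
  unfold pvPick
  rw [List.find?_cons]
  by_cases h : e > m
  · simp [h]
  · simp only [h, decide_false, if_false]
    cases hfind : l.find? (fun p => decide (p > m)) with
    | some p => rfl
    | none =>
      cases l with
      | nil => exact absurd rfl hl
      | cons x xs => simp [List.getLast?_cons_cons]

-- A's stop rule equals: first running total over the cap, else the final total
theorem pvLoopR_eq_pick (m : Int) (ds : List Int) : ∀ e, pvLoopR m ds e = pvPick m (pvScan e ds) := by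
  induction ds with
  | nil =>
    intro e
    by_cases h : e > m <;> simp [pvLoopR, pvScan, pvPick, List.find?, h]
  | cons d ds ih =>
    intro e
    rw [show pvScan e (d :: ds) = e :: pvScan (e + d) ds from rfl,
        pvPick_cons m e _ (pvScan_ne_nil _ _)]
    by_cases h : e > m
    · simp [pvLoopR, h]
    · simp [pvLoopR, h, ih (e + d)]

-- the distance table B builds
def pvDists (xs : List String) (c : Int) : List Int :=
  (List.range (max (min (c + 1) ((xs.length : Int) - c - 1)) 0).toNat).map (fun t =>
      pvHamB ((PySem.List.pyGet? xs (c - Int.ofNat t)).getD "")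
             ((PySem.List.pyGet? xs (c + 1 + Int.ofNat t)).getD ""))

theorem pvDists_length (xs : List String) (c : Int) :
    (pvDists xs c).length = (max (min (c + 1) ((xs.length : Int) - c - 1)) 0).toNat := by
  unfold pvDists
  rw [List.length_map, List.length_range]

theorem pvLoopA_eq_pvLoopR (xs : List String) (c m : Int) : ∀ e s, 1 ≤ s →
    pvLoopA xs c m e s = pvLoopR m ((pvDists xs c).drop (s - 1).toNat) e := by
  intro e s hs
  fun_induction pvLoopA xs c m e s with
  | case1 e s h l r e' ih =>
    obtain ⟨h1, h2, h3⟩ := h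
    have hk : (s - 1).toNat < (pvDists xs c).length := by rw [pvDists_length]; omega
    rw [List.drop_eq_getElem_cons hk]
    have hget : (pvDists xs c)[(s - 1).toNat]'hk = pvHamB l r := by
      unfold pvDists at *
      rw [List.getElem_map]
      have hL : c - Int.ofNat ((List.range (max (min (c + 1) ((xs.length : Int) - c - 1)) 0).toNat)[(s - 1).toNat]'(by simpa using hk)) = c - s + 1 := by
        rw [List.getElem_range, Int.ofNat_eq_natCast]; omega
      have hR : c + 1 + Int.ofNat ((List.range (max (min (c + 1) ((xs.length : Int) - c - 1)) 0).toNat)[(s - 1).toNat]'(by simpa using hk)) = c + s := by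
        rw [List.getElem_range, Int.ofNat_eq_natCast]; omega
      rw [hL, hR]
    rw [hget]
    have hstep : ((s + 1) - 1).toNat = (s - 1).toNat + 1 := by omega
    rw [ih (by omega), hstep]
    have he' : e' = e + pvHamB l r := by
      simp only [e']
      by_cases hlr : l = r
      · simp [hlr, pvHamB_self]
      · simp [hlr, pvHamA_eq]
    simp only [pvLoopR, if_neg (show ¬e > m by omega), he']
  | case2 e s h =>
    by_cases h3 : e ≤ m
    · have hdrop : (pvDists xs c).drop (s - 1).toNat = [] := by
        apply List.drop_eq_nil_of_le
        have hcases : c - s + 1 < 0 ∨ (xs.length : Int) ≤ c + s := by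
          by_contra hb
          push Not at hb
          exact h ⟨by omega, by omega, h3⟩
        rw [pvDists_length]
        omega
      rw [hdrop]; rfl
    · cases hdrop : (pvDists xs c).drop (s - 1).toNat <;>
        simp [pvLoopR, show e > m by omega]

-- ===== VERDICT (by name: the statement is the Claim_ definition above) =====
theorem get_candidate_error_count_spec : Claim_equal_get_candidate_error_count := by
  intro xs c m _
  unfold Spec_get_candidate_error_count get_candidate_error_count get_candidate_error_count_alt
  rw [pvLoopA_eq_pvLoopR xs c m 0 1 (by omega)]
  have hfold := pvFoldScan (pvDists xs c) [] 0
  simp only [List.nil_append] at hfold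
  show pvLoopR m ((pvDists xs c).drop ((1:Int) - 1).toNat) 0 = pvPick m ((pvDists xs c).foldl (fun acc d => acc ++ [acc.getLastD 0 + d]) [0])
  rw [show ((1:Int) - 1).toNat = 0 by omega, List.drop_zero, hfold, pvLoopR_eq_pick]
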